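-- pv_equiv track=rewrite | github.com/Ankita5051/DSA | OA/Mathworks/slow and fast pointer and find min segsize.py | dualSpeed
-- ===== SOURCE A (Python) =====
-- def dualSpeed(arr):
--     n = len(arr)
--
--     # Try every possible segment size
--     for segSize in range(1, n):
--         P1, P2 = 0, 1
--         ok = True
--
--         while P1 < n and P2 < n:
--             subarr = arr[P2 : min(P2 + segSize, n)]
--
--             # Check condition
--             if arr[P1] >= max(subarr):
--                 P1 += 1
--                 P2 += segSize
--             else:
--                 ok = False
--                 break
--
--         if ok:
--             return segSize
--
--     return -1
-- ===== SOURCE B (Python) =====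
-- def dualSpeed(arr):
--     n = len(arr)
--     for s in range(1, n):
--         if all(arr[(j - 1) // s] >= arr[j] for j in range(1, n)):
--             return s
--     return -1
-- ===== Notes on version B (the rewrite author's own statement) =====
-- stated objective: simpler
-- what changed: B replaces A's two-pointer loop with per-window slice construction and max() by a single direct check arr[(j-1)//s] >= arr[j] over every index j, using the fact that index j falls in the window paired with prefix position (j-1)//s.
import Mathlib
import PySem

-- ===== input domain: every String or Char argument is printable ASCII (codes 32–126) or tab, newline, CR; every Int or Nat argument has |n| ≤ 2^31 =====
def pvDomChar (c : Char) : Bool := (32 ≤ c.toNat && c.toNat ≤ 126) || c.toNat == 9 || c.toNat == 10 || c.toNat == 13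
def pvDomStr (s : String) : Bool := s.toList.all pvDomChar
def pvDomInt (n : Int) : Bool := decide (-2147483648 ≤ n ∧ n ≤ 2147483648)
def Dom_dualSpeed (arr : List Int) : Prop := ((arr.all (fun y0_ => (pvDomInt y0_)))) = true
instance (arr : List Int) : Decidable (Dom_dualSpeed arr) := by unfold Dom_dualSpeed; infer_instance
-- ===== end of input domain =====

-- B replaces A's two-pointer/slice/max inner loop by a direct per-index check arr[(j-1)//s] >= arr[j]; objective: simpler.

-- ===== PORT A =====
-- inner while loop of A; fuel only makes the recursion total (the loop runs at most n times)
def dualSpeedLoopA (arr : List Int) (n s : Int) (P1 P2 : Int) : Nat → Bool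
  | 0 => true
  | fuel + 1 =>
    if P1 < n && P2 < n then
      let subarr := PySem.List.slice arr (some P2) (some (min (P2 + s) n))
      if PySem.List.pyGetD arr P1 0 ≥ (PySem.List.max? subarr (fun x => x)).getD 0 then
        dualSpeedLoopA arr n s (P1 + 1) (P2 + s) fuel
      else false
    else true

-- the 'for segSize in range(1, n): … if ok: return segSize' loop
def dualSpeedOuterA (arr : List Int) (n : Int) : List Int → Int
  | [] => -1
  | segSize :: rest =>
    if dualSpeedLoopA arr n segSize 0 1 (n.toNat + 1) then segSize
    else dualSpeedOuterA arr n rest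

def dualSpeed (arr : List Int) : Int :=
  let n : Int := arr.length
  dualSpeedOuterA arr n (PySem.List.pyRange 1 n 1)

-- ===== PORT B =====
def dualSpeedCheckB (arr : List Int) (n s : Int) : Bool :=
  (PySem.List.pyRange 1 n 1).all (fun j =>
    decide (PySem.List.pyGetD arr (PySem.Int.floordiv (j - 1) s) 0 ≥ PySem.List.pyGetD arr j 0))

def dualSpeedOuterB (arr : List Int) (n : Int) : List Int → Int
  | [] => -1
  | s :: rest => if dualSpeedCheckB arr n s then s else dualSpeedOuterB arr n rest

def dualSpeed_alt (arr : List Int) : Int :=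
  let n : Int := arr.length
  dualSpeedOuterB arr n (PySem.List.pyRange 1 n 1)

-- ===== PRECONDITION & SPEC =====
def Spec_dualSpeed (arr : List Int) (out : Int) : Prop := out = dualSpeed_alt arr
instance (arr : List Int) (out : Int) : Decidable (Spec_dualSpeed arr out) := by unfold Spec_dualSpeed; infer_instance

-- ===== CLAIM (what is proved, stated in full; the proofs are below) =====
def Claim_equal_dualSpeed : Prop := ∀ (arr : List Int), Dom_dualSpeed arr → Spec_dualSpeed arr (dualSpeed arr)

-- ===== LEMMAS AND PROOFS =====

-- the loop invariant, stated with sorry for now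
theorem dualSpeedLoop_eq (arr : List Int) (s : Int) (hs : 1 ≤ s) :
    ∀ (fuel : Nat) (k : Int), 0 ≤ k → ((arr.length : Int) - (1 + k * s)).toNat ≤ fuel →
    dualSpeedLoopA arr (arr.length) s k (1 + k * s) fuel =
      (PySem.List.pyRange (1 + k * s) (arr.length) 1).all (fun j =>
        decide (PySem.List.pyGetD arr (PySem.Int.floordiv (j - 1) s) 0 ≥ PySem.List.pyGetD arr j 0)) := by
  intro fuel
  induction fuel with
  | zero =>
    intro k hk hfuel
    have hle : (arr.length : Int) ≤ 1 + k * s := by omega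
    simp [dualSpeedLoopA, PySem.List.pyRange_one_eq_nil hle]
  | succ fuel ih =>
    intro k hk hfuel
    by_cases hP2 : 1 + k * s < (arr.length : Int)
    · -- loop body runs
      have hks : 0 ≤ k * s := mul_nonneg hk (by omega)
      have hkk : k ≤ k * s := le_mul_of_one_le_right hk hs
      have hklt : k < (arr.length : Int) := by omega
      set n : Int := (arr.length : Int) with hn
      set P2 : Int := 1 + k * s with hP2def
      have hP2pos : 0 ≤ P2 := by omega
      set m : Int := min (P2 + s) n with hm
      have hP2m : P2 < m := by omega
      have hmn : m ≤ n := min_le_right _ _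
      have hmP2s : m ≤ P2 + s := min_le_left _ _
      set f : Int → Int := fun j => PySem.List.pyGetD arr j 0 with hf
      have hmapfull : (PySem.List.pyRange P2 n 1).map f = arr.drop P2.toNat :=
        PySem.List.map_pyGetD_pyRange' arr 0 hP2pos
      have hsplit : PySem.List.pyRange P2 n 1 =
          PySem.List.pyRange P2 m 1 ++ PySem.List.pyRange m n 1 :=
        PySem.List.pyRange_one_append P2 m n (by omega) hmn
      have hlen1 : ((PySem.List.pyRange P2 m 1).map f).length = m.toNat - P2.toNat := by
        simp [PySem.List.length_pyRange_one]; omega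
      have hslice : PySem.List.slice arr (some P2) (some m) = (PySem.List.pyRange P2 m 1).map f := by
        rw [PySem.List.slice_of_nonneg arr hP2pos (by omega) (by omega) (by omega)]
        rw [← hmapfull, hsplit, List.map_append]
        exact List.take_left' hlen1
      have hne : (PySem.List.pyRange P2 m 1).map f ≠ [] := by
        simp only [ne_eq, List.map_eq_nil_iff]
        intro hcon
        have := PySem.List.length_pyRange_one P2 m
        rw [hcon] at this
        simp at this
        omega
      -- on the window, (j - 1) // s is exactly P1 = k
      have hdiv : ∀ j ∈ PySem.List.pyRange P2 m 1, PySem.Int.floordiv (j - 1) s = k := by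
        intro j hj
        obtain ⟨hj1, hj2⟩ := PySem.List.mem_pyRange_one.mp hj
        rw [PySem.Int.floordiv_eq_ediv_of_pos (by omega)]
        have hrw : j - 1 = (j - 1 - k * s) + k * s := by ring
        rw [hrw, Int.add_mul_ediv_right _ _ (by omega : s ≠ 0),
            Int.ediv_eq_zero_of_lt (by omega) (by omega)]
        omega
      -- the maximum of the window
      obtain ⟨mx, hmx⟩ : ∃ mx, PySem.List.max? ((PySem.List.pyRange P2 m 1).map f) (fun x => x) = some mx := by
        cases hq : PySem.List.max? ((PySem.List.pyRange P2 m 1).map f) (fun x => x) with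
        | none => exact absurd ((PySem.List.max?_eq_none_iff _ _).mp hq) hne
        | some mx => exact ⟨mx, rfl⟩
      have hmx_mem : mx ∈ (PySem.List.pyRange P2 m 1).map f := PySem.List.max?_mem hmx
      have hmx_max : ∀ y ∈ (PySem.List.pyRange P2 m 1).map f, y ≤ mx := fun y hy =>
        PySem.List.max?_isMax hmx y hy
      -- unfold one loop iteration
      have hguard : (k < n && P2 < n) = true := by simp [hklt, hP2]
      simp only [dualSpeedLoopA, hguard, if_true]
      rw [← hm, hslice, hmx]
      simp only [Option.getD_some]
      rw [hsplit, List.all_append]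
      have hrange_next : PySem.List.pyRange m n 1 = PySem.List.pyRange (P2 + s) n 1 := by
        rcases le_or_gt (P2 + s) n with hc | hc
        · have hmeq : m = P2 + s := by omega
          rw [hmeq]
        · have hmeq : m = n := by omega
          rw [hmeq, PySem.List.pyRange_one_eq_nil le_rfl,
              PySem.List.pyRange_one_eq_nil (by omega : n ≤ P2 + s)]
      have hstep : (1 : Int) + (k + 1) * s = P2 + s := by rw [hP2def]; ring
      by_cases hcond : PySem.List.pyGetD arr k 0 ≥ mx
      · -- condition holds: every window element is ≤ arr[k]; recurse
        have hall1 : (PySem.List.pyRange P2 m 1).all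
            (fun j => decide (PySem.List.pyGetD arr (PySem.Int.floordiv (j - 1) s) 0 ≥ PySem.List.pyGetD arr j 0)) = true := by
          rw [List.all_eq_true]
          intro j hj
          rw [hdiv j hj]
          exact decide_eq_true (le_trans (hmx_max _ (List.mem_map_of_mem hj)) hcond)
        rw [if_pos hcond, hall1, Bool.true_and, hrange_next]
        have hfuel' : (n - (1 + (k + 1) * s)).toNat ≤ fuel := by rw [hstep]; omega
        have := ih (k + 1) (by omega) hfuel'
        rw [hstep] at this
        exact this
      · -- condition fails: the window's maximum falsifies the right-hand side
        rw [if_neg hcond]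
        obtain ⟨j, hj, hjval⟩ := List.mem_map.mp hmx_mem
        have hall1 : (PySem.List.pyRange P2 m 1).all
            (fun j => decide (PySem.List.pyGetD arr (PySem.Int.floordiv (j - 1) s) 0 ≥ PySem.List.pyGetD arr j 0)) = false := by
          rw [List.all_eq_false]
          refine ⟨j, hj, ?_⟩
          rw [hdiv j hj, show PySem.List.pyGetD arr j 0 = mx from hjval]
          simp [hcond]
        rw [hall1, Bool.false_and]
    · -- loop guard false: nothing to check
      have hg : (k < (arr.length : Int) && 1 + k * s < (arr.length : Int)) = false := by
        simp; intro _; omega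
      simp only [dualSpeedLoopA, hg, if_false, Bool.false_eq_true,
        PySem.List.pyRange_one_eq_nil (by omega : (arr.length : Int) ≤ 1 + k * s), List.all_nil]

theorem dualSpeedOuter_eq (arr : List Int) (n : Int) (L : List Int)
    (h : ∀ s ∈ L, dualSpeedLoopA arr n s 0 1 (n.toNat + 1) = dualSpeedCheckB arr n s) :
    dualSpeedOuterA arr n L = dualSpeedOuterB arr n L := by
  induction L with
  | nil => rfl
  | cons s rest ih =>
    have hs := h s (List.mem_cons_self ..)
    simp only [dualSpeedOuterA, dualSpeedOuterB, hs]
    split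
    · rfl
    · exact ih (fun t ht => h t (List.mem_cons_of_mem _ ht))

-- ===== VERDICT (by name: the statement is the Claim_ definition above) =====
theorem dualSpeed_spec : Claim_equal_dualSpeed := by
  intro arr _
  unfold Spec_dualSpeed dualSpeed dualSpeed_alt
  refine dualSpeedOuter_eq arr _ _ (fun s hs => ?_)
  have h1 : (1 : Int) ≤ s := (PySem.List.mem_pyRange_one.mp hs).1
  have := dualSpeedLoop_eq arr s h1 ((arr.length : Int).toNat + 1) 0 le_rfl (by omega)
  simpa [dualSpeedCheckB] using this
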